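-- pv_equiv track=rewrite | github.com/VectorInstitute/odyssey | odyssey/data/seq/_events.py | _concat_conditions
-- ===== SOURCE A (Python) =====
-- from typing import Dict, List
--
-- def _concat_conditions(
--
--     encounter_conditions: Dict[str, List[str]],
--     encounter_order: Dict[str, int],
-- ) -> Dict[int, List[str]]:
--     """Concatenate the conditions of the encounters using the encounter order."""
--     order_groups = {}
--     for encounter, order in encounter_order.items():
--         if order not in order_groups:
--             order_groups[order] = [encounter]
--         else:
--             order_groups[order].append(encounter)
--
--     concatenated_conditions = {}
--     for order, encounters in order_groups.items():
--         all_conditions = []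
--         for encounter in encounters:
--             all_conditions.extend(encounter_conditions.get(encounter, []))
--         concatenated_conditions[order] = all_conditions
--
--     return concatenated_conditions
-- ===== SOURCE B (Python) =====
-- def _concat_conditions(
--     encounter_conditions,
--     encounter_order,
-- ):
--     """Concatenate the conditions of the encounters using the encounter order."""
--     concatenated_conditions = {}
--     for encounter, order in encounter_order.items():
--         concatenated_conditions.setdefault(order, []).extend(
--             encounter_conditions.get(encounter, [])
--         )
--     return concatenated_conditions
-- ===== Notes on version B (the rewrite author's own statement) =====
-- stated objective: simpler
-- what changed: Fused A's two passes (build an order->encounters grouping dict, then a second pass concatenating conditions per group) into a single loop over encounter_order that accumulates conditions directly into the result with setdefault/extend, dropping the intermediate index entirely.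
import Mathlib
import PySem

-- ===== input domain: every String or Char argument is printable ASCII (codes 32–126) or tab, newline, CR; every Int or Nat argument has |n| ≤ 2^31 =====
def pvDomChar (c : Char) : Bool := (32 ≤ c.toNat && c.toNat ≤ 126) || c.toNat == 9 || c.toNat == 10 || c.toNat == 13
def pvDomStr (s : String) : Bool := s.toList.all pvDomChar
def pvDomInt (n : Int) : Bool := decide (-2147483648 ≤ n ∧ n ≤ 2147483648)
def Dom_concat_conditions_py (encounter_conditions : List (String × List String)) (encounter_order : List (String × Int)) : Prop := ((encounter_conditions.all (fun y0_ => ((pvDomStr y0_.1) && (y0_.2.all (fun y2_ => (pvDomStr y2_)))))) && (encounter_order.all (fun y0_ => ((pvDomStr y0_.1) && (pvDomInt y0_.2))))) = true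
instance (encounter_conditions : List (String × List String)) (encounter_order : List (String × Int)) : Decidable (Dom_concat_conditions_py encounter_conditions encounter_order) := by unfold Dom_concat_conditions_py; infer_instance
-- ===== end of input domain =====

-- B fuses A's two passes (group encounters by order, then concatenate per group) into one
-- accumulation loop over encounter_order; objective: simpler (same output, same order).


-- ===== PORT A =====
-- A: first pass groups encounters by order (first-seen key order), second pass
-- concatenates each group's conditions in group order.
def concat_conditions_py (encounter_conditions : List (String × List String)) (encounter_order : List (String × Int)) : List (Int × List String) :=
  let ecd := PySem.Dict.ofList encounter_conditions
  let eod := PySem.Dict.ofList encounter_order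
  let order_groups :=
    eod.items.foldl (fun g p =>
      if g.contains p.2 = false then g.insert p.2 [p.1]
      else g.modify p.2 [] (· ++ [p.1])) PySem.Dict.empty
  let concatenated :=
    order_groups.items.foldl (fun c q =>
      c.insert q.1 (q.2.foldl (fun acc e => acc ++ ecd.getD e []) [])) PySem.Dict.empty
  concatenated.items

-- ===== PORT B =====
-- B: one loop; result.setdefault(order, []).extend(conditions.get(encounter, []))
-- is Dict.modify order [] (· ++ conds).
def concat_conditions_py_alt (encounter_conditions : List (String × List String)) (encounter_order : List (String × Int)) : List (Int × List String) :=
  let ecd := PySem.Dict.ofList encounter_conditions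
  let eod := PySem.Dict.ofList encounter_order
  (eod.items.foldl (fun r p =>
      r.modify p.2 [] (· ++ ecd.getD p.1 [])) PySem.Dict.empty).items

-- ===== PRECONDITION & SPEC =====
def Spec_concat_conditions_py (encounter_conditions : List (String × List String)) (encounter_order : List (String × Int)) (out : List (Int × List String)) : Prop := out = concat_conditions_py_alt encounter_conditions encounter_order
instance (encounter_conditions : List (String × List String)) (encounter_order : List (String × Int)) (out : List (Int × List String)) : Decidable (Spec_concat_conditions_py encounter_conditions encounter_order out) := by unfold Spec_concat_conditions_py; infer_instance

-- ===== CLAIM (what is proved, stated in full; the proofs are below) =====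
def Claim_equal_concat_conditions_py : Prop := ∀ (encounter_conditions : List (String × List String)) (encounter_order : List (String × Int)), Dom_concat_conditions_py encounter_conditions encounter_order → Spec_concat_conditions_py encounter_conditions encounter_order (concat_conditions_py encounter_conditions encounter_order)

-- ===== LEMMAS AND PROOFS =====

-- A's grouping step (insert-new / append-existing) is exactly a Dict.modify append.
theorem stepA_eq (g : PySem.Dict Int (List String)) (p : String × Int) :
    (if g.contains p.2 = false then g.insert p.2 [p.1]
     else g.modify p.2 [] (· ++ [p.1])) = g.modify p.2 [] (· ++ [p.1]) := by
  by_cases h : g.contains p.2 = false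
  · simp [h, PySem.Dict.modify, PySem.Dict.insert,
      PySem.Dict.getD_of_not_contains g _ h]
  · simp [h]

-- value at key o of a modify-append loop keyed by the pair's second component
-- (specific shape: keyed by .2, appending a whole list per element)
theorem getD_groupfold (cond : String → List String) :
    ∀ (l : List (String × Int)) (d : PySem.Dict Int (List String)) (o : Int),
    (l.foldl (fun r p => r.modify p.2 [] (· ++ cond p.1)) d).getD o []
      = d.getD o [] ++ (l.filter (fun p => p.2 == o)).flatMap (fun p => cond p.1) := by
  intro l
  induction l with
  | nil => simp
  | cons p l ih =>
    intro d o
    simp only [List.foldl_cons, ih, List.filter_cons]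
    by_cases h : p.2 = o
    · subst h; simp [PySem.Dict.getD_modify_self]
    · simp [PySem.Dict.getD_modify, h, Ne.symm h]

theorem concat_conditions_eq (ec : List (String × List String)) (eo : List (String × Int)) :
    concat_conditions_py ec eo = concat_conditions_py_alt ec eo := by
  unfold concat_conditions_py concat_conditions_py_alt
  simp only []
  generalize PySem.Dict.ofList ec = ecd
  generalize (PySem.Dict.ofList eo).items = l
  have hfun : (fun (g : PySem.Dict Int (List String)) (p : String × Int) =>
      if g.contains p.2 = false then g.insert p.2 [p.1]
      else g.modify p.2 [] (· ++ [p.1]))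
      = fun g p => g.modify p.2 [] (· ++ [p.1]) := by
    funext g p; exact stepA_eq g p
  rw [hfun]
  set g := l.foldl (fun g p => g.modify p.2 [] (· ++ [p.1])) PySem.Dict.empty with hg
  set r := l.foldl (fun r p => r.modify p.2 [] (· ++ ecd.getD p.1 [])) PySem.Dict.empty with hr
  have hgnd : g.keys.Nodup := by
    rw [hg]
    exact PySem.Dict.nodup_keys_foldl_modify_key l (·.2) [] (fun _ p => (· ++ [p.1])) _ PySem.Dict.nodup_keys_empty
  have hrnd : r.keys.Nodup := by
    rw [hr]
    exact PySem.Dict.nodup_keys_foldl_modify_key l (·.2) [] (fun _ p => (· ++ ecd.getD p.1 [])) _ PySem.Dict.nodup_keys_empty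
  have hkeys : g.keys = r.keys := by
    rw [hg, hr, PySem.Dict.keys_foldl_modify_key, PySem.Dict.keys_foldl_modify_key]
  rw [PySem.Dict.items_foldl_insert_fresh g.items (fun q => q.1)
        (fun q => q.2.foldl (fun acc e => acc ++ ecd.getD e []) []) PySem.Dict.empty
        (by intro a _; exact PySem.Dict.contains_empty _)
        (by simpa using hgnd)]
  rw [PySem.Dict.items_eq_map_keys g hgnd [], PySem.Dict.items_eq_map_keys r hrnd []]
  simp only [List.map_map, hkeys]
  apply List.map_congr_left
  intro o _
  simp only [Function.comp]
  rw [hg, hr, getD_groupfold (fun e => [e]), getD_groupfold (fun e => ecd.getD e [])]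
  simp [List.flatMap_def, List.map_map]
  simp only [Function.comp_def]
  generalize (List.filter (fun p => p.2 == o) l) = m
  induction m with
  | nil => simp
  | cons a t ih => simp at ih; simp [ih]

-- ===== VERDICT (by name: the statement is the Claim_ definition above) =====
theorem concat_conditions_py_spec : Claim_equal_concat_conditions_py := by
  intro ec eo _
  unfold Spec_concat_conditions_py
  exact concat_conditions_eq ec eo
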